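-- pv_equiv track=rewrite | github.com/jrrhuang/QOSF_Application | assessment_task_3_v1.py | next_idx
-- ===== SOURCE A (Python) =====
-- def next_idx(s):
--     """Return string representing next binary index."""
--
--     b_lst = list(s[::-1])
--
--     for i, bit in enumerate(b_lst):
--         if bit == "0":
--             b_lst[i] = "1"
--             break
--         else:
--             b_lst[i] = "0"
--
--     return "".join(b_lst[::-1])
-- ===== SOURCE B (Python) =====
-- def next_idx(s):
--     """Return string representing next binary index."""
--     pos = s.rfind("0")
--     if pos == -1:
--         return "0" * len(s)
--     return s[:pos] + "1" + "0" * (len(s) - pos - 1)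
-- ===== Notes on version B (the rewrite author's own statement) =====
-- stated objective: simpler
-- what changed: B locates the rightmost zero character with one rfind and assembles the result directly from a slice plus a repeated run of zeros, instead of A's reverse-the-string, flip-each-character-in-a-list-until-a-zero loop followed by a second reverse and join.
import Mathlib
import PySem

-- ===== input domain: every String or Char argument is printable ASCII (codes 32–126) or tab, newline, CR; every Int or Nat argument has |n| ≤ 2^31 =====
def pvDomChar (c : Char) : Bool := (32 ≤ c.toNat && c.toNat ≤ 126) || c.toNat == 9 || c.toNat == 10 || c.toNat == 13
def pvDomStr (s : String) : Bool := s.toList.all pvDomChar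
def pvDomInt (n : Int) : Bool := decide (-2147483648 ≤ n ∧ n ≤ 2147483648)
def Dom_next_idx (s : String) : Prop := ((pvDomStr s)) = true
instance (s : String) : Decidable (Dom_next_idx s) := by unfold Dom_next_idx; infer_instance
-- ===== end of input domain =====

-- B finds the rightmost '0' with one rfind and assembles the output from a slice plus a run of
-- '0's, instead of A's reverse-the-string, flip-characters-until-a-zero loop (objective: simpler).


-- ===== PORT A =====
-- the for-loop over b_lst = list(s[::-1]): flip every char to '0' until the first '0',
-- which becomes '1' and breaks; the untouched tail is kept as is
def nextIdxLoop : List Char → List Char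
  | [] => []
  | c :: rest => if c == '0' then '1' :: rest else '0' :: nextIdxLoop rest

-- b_lst = list(s[::-1]); the loop above; return "".join(b_lst[::-1])  (s[::-1] = reverse)
def next_idx (s : String) : String :=
  String.ofList ((nextIdxLoop s.toList.reverse).reverse)

-- ===== PORT B =====
-- pos = s.rfind("0"); if pos == -1: return "0"*len(s); return s[:pos] + "1" + "0"*(len(s)-pos-1)
def next_idx_alt (s : String) : String :=
  let pos : Int := PySem.Str.rfind s "0"
  if pos = -1 then
    String.ofList (PySem.List.pyRepeat ['0'] (s.toList.length : Int))
  else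
    String.ofList (PySem.Chars.slice s.toList none (some pos) ++ ['1'] ++
      PySem.List.pyRepeat ['0'] ((s.toList.length : Int) - pos - 1))

-- ===== PRECONDITION & SPEC =====
def Spec_next_idx (s : String) (out : String) : Prop := out = next_idx_alt s
instance (s : String) (out : String) : Decidable (Spec_next_idx s out) := by unfold Spec_next_idx; infer_instance

-- ===== CLAIM (what is proved, stated in full; the proofs are below) =====
def Claim_equal_next_idx : Prop := ∀ (s : String), Dom_next_idx s → Spec_next_idx s (next_idx s)

-- ===== LEMMAS AND PROOFS =====

theorem singleton_isPrefixOf_nil (d : Char) : [d].isPrefixOf ([] : List Char) = false := rfl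

theorem singleton_isPrefixOf_cons (d x : Char) (xs : List Char) :
    [d].isPrefixOf (x :: xs) = (d == x) := by
  simp [List.isPrefixOf]

theorem rfind_go_zero (s sub : List Char) :
    PySem.Chars.rfind.go s sub 0 = if sub.isPrefixOf s then 0 else -1 := by
  simp [PySem.Chars.rfind.go]

theorem rfind_go_succ (s sub : List Char) (j : Nat) :
    PySem.Chars.rfind.go s sub (j+1) =
      if sub.isPrefixOf (s.drop (j+1)) then ((j : Int) + 1) else PySem.Chars.rfind.go s sub j := by
  rw [PySem.Chars.rfind.go]
  split <;> simp_all

theorem rfind_nil (d : Char) : PySem.Chars.rfind ([] : List Char) [d] = -1 := by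
  unfold PySem.Chars.rfind
  rw [show ([] : List Char).length = 0 from rfl, rfind_go_zero, singleton_isPrefixOf_nil]
  rfl

-- appending a non-matching char does not change go (for k within l)
theorem rfind_go_append (l : List Char) (c d : Char) (hcd : c ≠ d) :
    ∀ k, k ≤ l.length →
      PySem.Chars.rfind.go (l ++ [c]) [d] k = PySem.Chars.rfind.go l [d] k := by
  intro k
  induction k with
  | zero =>
    intro _
    rw [rfind_go_zero, rfind_go_zero]
    cases l with
    | nil => simp [singleton_isPrefixOf_cons, hcd.symm]
    | cons x xs => simp [singleton_isPrefixOf_cons]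
  | succ j ih =>
    intro hk
    rw [rfind_go_succ, rfind_go_succ, ih (by omega)]
    have hdrop : ([d].isPrefixOf ((l ++ [c]).drop (j+1))) = ([d].isPrefixOf (l.drop (j+1))) := by
      rw [List.drop_append_of_le_length (by omega)]
      rcases h : l.drop (j+1) with _ | ⟨x, xs⟩
      · have hlen : l.length ≤ j + 1 := by
          have := congrArg List.length h; simp at this; omega
        simp [singleton_isPrefixOf_cons, hcd.symm]
      · simp [singleton_isPrefixOf_cons]
    rw [hdrop]

theorem rfind_append_single (l : List Char) (c d : Char) :
    PySem.Chars.rfind (l ++ [c]) [d] =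
      if c = d then (l.length : Int) else PySem.Chars.rfind l [d] := by
  unfold PySem.Chars.rfind
  simp only [List.length_append, List.length_cons, List.length_nil, Nat.zero_add]
  rw [rfind_go_succ]
  have h1 : ((l ++ [c]).drop (l.length + 1)) = ([] : List Char) := by simp
  rw [h1, singleton_isPrefixOf_nil]
  simp only [Bool.false_eq_true, if_false]
  by_cases hcd : c = d
  · subst hcd
    rw [if_pos rfl]
    cases hl : l.length with
    | zero =>
      have hnil : l = [] := List.length_eq_zero_iff.mp hl
      subst hnil
      rw [rfind_go_zero]
      simp
    | succ m =>
      rw [← hl, show l.length = (l.length - 1) + 1 by omega, rfind_go_succ]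
      have h2 : ((l ++ [c]).drop (l.length - 1 + 1)) = [c] := by
        rw [show l.length - 1 + 1 = l.length by omega]
        simp
      rw [h2, singleton_isPrefixOf_cons]
      simp
  · rw [if_neg hcd, rfind_go_append l c d hcd l.length (le_refl _)]

-- when rfind finds a single char, its index is a valid position
theorem rfind_single_bounds (l : List Char) (d : Char) :
    PySem.Chars.rfind l [d] = -1 ∨
      (0 ≤ PySem.Chars.rfind l [d] ∧ PySem.Chars.rfind l [d] < l.length) := by
  induction l using List.reverseRecOn with
  | nil => exact Or.inl (rfind_nil d)
  | append_singleton xs c ih =>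
    rw [rfind_append_single]
    by_cases h : c = d
    · subst h
      rw [if_pos rfl]
      right
      constructor
      · exact_mod_cast Nat.zero_le _
      · have h : xs.length < (xs ++ [c]).length := by simp
        exact_mod_cast h
    · simp only [h, if_false]
      rcases ih with h1 | ⟨h1, h2⟩
      · left; exact h1
      · right
        refine ⟨h1, ?_⟩
        simp only [List.length_append, List.length_cons, List.length_nil]
        push_cast
        omega

-- the heart of the file: A's flip-loop result equals B's slice/replicate assembly, on lists
theorem key (l : List Char) :
    (nextIdxLoop l.reverse).reverse =
      (if PySem.Chars.rfind l ['0'] = -1 then List.replicate l.length '0'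
       else l.take (PySem.Chars.rfind l ['0']).toNat ++
         '1' :: List.replicate (l.length - (PySem.Chars.rfind l ['0']).toNat - 1) '0') := by
  induction l using List.reverseRecOn with
  | nil =>
    simp [rfind_nil, nextIdxLoop]
  | append_singleton xs c ih =>
    rw [rfind_append_single]
    by_cases hc : c = '0'
    · subst hc
      rw [if_pos rfl]
      have hne : ((xs.length : Int)) ≠ -1 := by omega
      rw [if_neg hne]
      have hrw : (xs ++ ['0']).reverse = '0' :: xs.reverse := by simp
      rw [hrw]
      have hloop : nextIdxLoop ('0' :: xs.reverse) = '1' :: xs.reverse := by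
        simp [nextIdxLoop]
      rw [hloop]
      have htoNat : ((xs.length : Int)).toNat = xs.length := by omega
      rw [htoNat, List.take_append_of_le_length (le_refl _), List.take_length]
      simp
    · have hrw : (xs ++ [c]).reverse = c :: xs.reverse := by simp
      rw [hrw]
      have hloop : nextIdxLoop (c :: xs.reverse) = '0' :: nextIdxLoop xs.reverse := by
        simp [nextIdxLoop, hc]
      rw [if_neg hc, hloop]
      simp only [List.reverse_cons]
      rw [ih]
      rcases rfind_single_bounds xs '0' with h1 | ⟨h1, h2⟩
      · simp [h1, List.replicate_succ']
      · have hne : PySem.Chars.rfind xs ['0'] ≠ -1 := by omega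
        rw [if_neg hne, if_neg hne]
        set p := (PySem.Chars.rfind xs ['0']).toNat with hp
        have hplt : p < xs.length := by omega
        rw [List.take_append_of_le_length (by omega)]
        simp only [List.append_assoc, List.cons_append, List.length_append,
          List.length_cons, List.length_nil]
        congr 1
        congr 1
        rw [← List.replicate_succ']
        congr 1
        omega

-- ===== VERDICT (by name: the statement is the Claim_ definition above) =====
theorem next_idx_spec : Claim_equal_next_idx := by
  intro s _
  unfold Spec_next_idx next_idx next_idx_alt
  have hrf : PySem.Str.rfind s "0" = PySem.Chars.rfind s.toList ['0'] := by
    rw [PySem.Str.rfind_eq]; rfl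
  rw [hrf, key s.toList]
  rcases rfind_single_bounds s.toList '0' with h1 | ⟨h1, h2⟩
  · rw [if_pos h1, if_pos h1]
    congr 1
    rw [PySem.List.pyRepeat_singleton]
    congr 1
  · have hne : PySem.Chars.rfind s.toList ['0'] ≠ -1 := by omega
    rw [if_neg hne, if_neg hne]
    congr 1
    rw [PySem.Chars.slice_eq_listSlice, PySem.List.slice_to _ h1,
      PySem.List.pyRepeat_singleton]
    have : ((s.toList.length : Int) - PySem.Chars.rfind s.toList ['0'] - 1).toNat
        = s.toList.length - (PySem.Chars.rfind s.toList ['0']).toNat - 1 := by omega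
    rw [this]
    simp
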